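-- pv_equiv track=rewrite | github.com/airtai/faststream | docs/update_releases.py | find_metablock
-- ===== SOURCE A (Python) =====
-- from typing import List, Sequence, Tuple
--
-- def find_metablock(lines: List[str]) -> Tuple[List[str], List[str]]:
--     if lines[0] != "---":
--         return [], lines
--
--     index: int = 0
--     for i in range(1, len(lines)):
--         if lines[i] == "---":
--             index = i + 1
--
--     return lines[:index], lines[index:]
-- ===== SOURCE B (Python) =====
-- from typing import List, Tuple
--
-- def find_metablock(lines: List[str]) -> Tuple[List[str], List[str]]:
--     if lines[0] != "---":
--         return [], lines
--     tail_rev = lines[1:][::-1]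
--     if "---" in tail_rev:
--         index = len(lines) - tail_rev.index("---")
--     else:
--         index = 0
--     return lines[:index], lines[index:]
-- ===== Notes on version B (the rewrite author's own statement) =====
-- stated objective: idiomatic
-- what changed: B has no explicit loop or accumulator: it reverses the tail and locates the last delimiter with the library membership test and list.index, instead of A's forward index loop that overwrites the match position.
import Mathlib
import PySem

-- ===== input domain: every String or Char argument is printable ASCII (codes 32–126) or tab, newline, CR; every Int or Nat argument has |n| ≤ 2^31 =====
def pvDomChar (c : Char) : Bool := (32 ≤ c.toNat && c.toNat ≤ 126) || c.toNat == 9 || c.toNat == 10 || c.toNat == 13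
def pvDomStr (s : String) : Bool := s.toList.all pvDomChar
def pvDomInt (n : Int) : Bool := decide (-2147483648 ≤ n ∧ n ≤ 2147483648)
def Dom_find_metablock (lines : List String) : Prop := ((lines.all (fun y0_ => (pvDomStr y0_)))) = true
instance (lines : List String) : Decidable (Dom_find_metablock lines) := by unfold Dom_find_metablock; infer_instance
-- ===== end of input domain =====

-- B drops A's index loop entirely: it reverses the tail and finds the last delimiter
-- with the library membership test and list.index; objective: idiomatic.

-- ===== PORT A =====
-- A: guard on lines[0]; forward loop over range(1, len(lines)) overwriting index at every '---'.
def find_metablock (lines : List String) : List String × List String :=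
  if (PySem.List.pyGet? lines 0).getD "" ≠ "---" then ([], lines)
  else
    let index : Int :=
      (PySem.List.pyRange 1 (lines.length : Int) 1).foldl
        (fun index i => if (PySem.List.pyGet? lines i).getD "" = "---" then i + 1 else index) 0
    (PySem.List.slice lines none (some index), PySem.List.slice lines (some index) none)

-- ===== PORT B =====
-- B: guard; tail_rev = lines[1:][::-1]; if '---' in tail_rev, index = len(lines) - tail_rev.index('---'), else 0.
def find_metablock_alt (lines : List String) : List String × List String :=
  if (PySem.List.pyGet? lines 0).getD "" ≠ "---" then ([], lines)
  else
    let tail_rev : List String := (PySem.List.slice lines (some 1) none).reverse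
    let index : Int :=
      if "---" ∈ tail_rev then
        (lines.length : Int) - (((PySem.List.index? tail_rev "---").getD 0 : Nat) : Int)
      else 0
    (PySem.List.slice lines none (some index), PySem.List.slice lines (some index) none)

-- ===== PRECONDITION & SPEC =====
-- Python A raises IndexError at lines[0] on the empty list (so does B); only [] is excluded.
def Pre_find_metablock (lines : List String) : Prop := lines ≠ []
instance (lines : List String) : Decidable (Pre_find_metablock lines) := by unfold Pre_find_metablock; infer_instance
def pvWitness_find_metablock : List String := ["---", "a: 1", "---", "body"]

def Spec_find_metablock (lines : List String) (out : List String × List String) : Prop := out = find_metablock_alt lines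
instance (lines : List String) (out : List String × List String) : Decidable (Spec_find_metablock lines out) := by unfold Spec_find_metablock; infer_instance

-- ===== CLAIM (what is proved, stated in full; the proofs are below) =====
def Claim_equal_find_metablock : Prop := ∀ (lines : List String), Dom_find_metablock lines → Pre_find_metablock lines → Spec_find_metablock lines (find_metablock lines)

-- ===== LEMMAS AND PROOFS =====

-- A's forward fold computes exactly B's closed form: len(lines) minus the position of
-- '---' in the reversed tail (0 when the reversed tail has no '---').
theorem foldA_char (lines : List String) :
    (PySem.List.pyRange 1 (lines.length : Int) 1).foldl
        (fun index i => if (PySem.List.pyGet? lines i).getD "" = "---" then i + 1 else index) 0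
    = (if "---" ∈ (lines.drop 1).reverse then
         (lines.length : Int) - (((PySem.List.index? ((lines.drop 1).reverse) "---").getD 0 : Nat) : Int)
       else 0) := by
  induction lines using List.reverseRecOn with
  | nil =>
    rw [show (([] : List String).length : Int) = 0 from rfl, PySem.List.pyRange_one_eq_nil (by omega)]
    simp only [List.foldl_nil, List.drop_nil, List.reverse_nil]
    rw [if_neg (List.not_mem_nil)]
  | append_singleton ys z ih =>
    rcases List.eq_nil_or_concat ys with hys | ⟨ws, w, hw⟩
    · subst hys
      simp only [List.nil_append]
      rw [show (([z] : List String).length : Int) = 1 from by simp, PySem.List.pyRange_one_eq_nil (by omega)]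
      simp only [List.foldl_nil, List.drop_succ_cons, List.drop_nil, List.reverse_nil]
      rw [if_neg (List.not_mem_nil)]
    · have hne0 : ys ≠ [] := by subst hw; simp
      have hlen : 1 ≤ ys.length := by
        have := List.length_pos_of_ne_nil hne0
        omega
      have hcast : ((ys ++ [z]).length : Int) = (ys.length : Int) + 1 := by
        simp
      rw [hcast, PySem.List.pyRange_one_succ_right (by exact_mod_cast hlen)]
      rw [List.foldl_append]
      -- the first part of the fold only reads indices < ys.length, where ys ++ [z] agrees with ys
      have hcongr :
          (PySem.List.pyRange 1 (ys.length : Int) 1).foldl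
            (fun index i => if (PySem.List.pyGet? (ys ++ [z]) i).getD "" = "---" then i + 1 else index) 0
          = (PySem.List.pyRange 1 (ys.length : Int) 1).foldl
            (fun index i => if (PySem.List.pyGet? ys i).getD "" = "---" then i + 1 else index) 0 := by
        refine PySem.List.foldl_congr_mem _ _ _ _ ?_
        intro acc i hi
        rw [PySem.List.mem_pyRange_one] at hi
        have h0 : i = ((i.toNat : Nat) : Int) := by omega
        rw [h0, PySem.List.pyGet?_natCast, PySem.List.pyGet?_natCast,
            List.getElem?_append_left (by omega)]
      rw [hcongr, ih]
      -- the last iteration reads z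
      have hlast : (PySem.List.pyGet? (ys ++ [z]) (ys.length : Int)).getD "" = z := by
        rw [PySem.List.pyGet?_natCast]
        simp
      have hdrop : (ys ++ [z]).drop 1 = ys.drop 1 ++ [z] := by
        cases ys with
        | nil => exact absurd rfl hne0
        | cons _ _ => simp
      rw [hdrop, List.reverse_append]
      simp only [List.reverse_singleton, List.singleton_append, List.foldl_cons, List.foldl_nil, hlast]
      by_cases hz : z = "---"
      · subst hz
        rw [if_pos rfl, if_pos (List.mem_cons_self), PySem.List.index?_cons_self _ _]
        simp only [Option.getD_some, Nat.cast_zero]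
        ring
      · have hne : z ≠ "---" := hz
        rw [if_neg hz]
        by_cases hmem : "---" ∈ (ys.drop 1).reverse
        · obtain ⟨j, hj⟩ := Option.isSome_iff_exists.mp ((PySem.List.index?_isSome_iff _ _).mpr hmem)
          rw [if_pos hmem, if_pos (List.mem_cons_of_mem z hmem),
              PySem.List.index?_cons_of_ne _ hne, hj]
          simp only [Option.map_some, Option.getD_some]
          push_cast
          ring
        · rw [if_neg hmem,
              if_neg (by
                intro h
                rcases List.mem_cons.mp h with h | h
                · exact hz h.symm
                · exact hmem h)]

-- ===== VERDICT (by name: the statement is the Claim_ definition above) =====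
theorem find_metablock_spec : Claim_equal_find_metablock := by
  intro lines _ _
  unfold Spec_find_metablock find_metablock find_metablock_alt
  by_cases hg : (PySem.List.pyGet? lines 0).getD "" = "---"
  · simp only [hg, ne_eq, not_true_eq_false, if_false]
    rw [foldA_char, PySem.List.slice_from_one, ← List.drop_one]
  · simp [hg]
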